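-- pv_equiv track=rewrite | github.com/azcoigreach/nagatha_core | nagatha_core/observability/tracing.py | extract_correlation_id_from_headers
-- ===== SOURCE A (Python) =====
-- from typing import Generator, Optional
--
-- def extract_correlation_id_from_headers(headers: dict) -> Optional[str]:
--     """
--     Extract correlation ID from HTTP headers.
--
--     Looks for common header names:
--     - X-Correlation-ID
--     - X-Request-ID
--     - X-Trace-ID
--
--     Args:
--         headers: HTTP headers dictionary
--
--     Returns:
--         Correlation ID if found, None otherwise
--
--     Example:
--         >>> headers = {"X-Correlation-ID": "abc-123"}
--         >>> extract_correlation_id_from_headers(headers)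
--         'abc-123'
--     """
--     # Common header names (case-insensitive)
--     header_names = [
--         "x-correlation-id",
--         "x-request-id",
--         "x-trace-id",
--     ]
--
--     # Normalize headers to lowercase
--     normalized = {k.lower(): v for k, v in headers.items()}
--
--     for name in header_names:
--         if name in normalized:
--             return normalized[name]
--
--     return None
-- ===== SOURCE B (Python) =====
-- def extract_correlation_id_from_headers(headers: dict):
--     """Single pass over the headers, keeping the highest-priority match seen."""
--     priority = {"x-correlation-id": 0, "x-request-id": 1, "x-trace-id": 2}
--     best = None
--     for key, value in headers.items():
--         rank = priority.get(key.lower())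
--         if rank is not None and (best is None or rank < best[0]):
--             best = (rank, value)
--     return None if best is None else best[1]
-- ===== Notes on version B (the rewrite author's own statement) =====
-- stated objective: alternative
-- what changed: Replaces the normalized-dict rebuild plus priority lookup loop by a single pass over the header pairs keeping the lowest-rank (highest-priority) match; Pre_ excludes headers with case-colliding duplicates of a target name, where A's last-wins value is an accident of dict reinsertion order while B naturally keeps the first.
-- outside the precondition, e.g. on extract_correlation_id_from_headers({'X-Request-ID': 'a', 'x-request-id': 'b'}): A returns 'b', B returns 'a'
import Mathlib
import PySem

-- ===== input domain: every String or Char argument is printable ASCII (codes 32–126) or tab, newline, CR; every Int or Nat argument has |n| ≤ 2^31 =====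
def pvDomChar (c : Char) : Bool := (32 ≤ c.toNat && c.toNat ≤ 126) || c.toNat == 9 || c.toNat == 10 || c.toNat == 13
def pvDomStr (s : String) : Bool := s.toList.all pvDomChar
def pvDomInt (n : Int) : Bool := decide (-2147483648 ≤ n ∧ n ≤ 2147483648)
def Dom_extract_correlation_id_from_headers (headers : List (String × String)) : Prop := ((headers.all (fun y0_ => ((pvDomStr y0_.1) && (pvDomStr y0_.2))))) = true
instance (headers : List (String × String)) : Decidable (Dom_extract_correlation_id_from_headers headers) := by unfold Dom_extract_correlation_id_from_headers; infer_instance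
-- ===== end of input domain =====

-- B replaces A's normalized-dict rebuild + per-name lookup loop with a single pass over the
-- header pairs keeping the highest-priority match ('alternative', same cost).

-- ===== PORT A =====
-- the 'for name in header_names: if name in normalized: return normalized[name]' loop
def pvALoop (normalized : PySem.Dict String String) : List String → Option String
  | [] => none
  | n :: rest =>
    if normalized.contains n then normalized.get? n else pvALoop normalized rest

def extract_correlation_id_from_headers (headers : List (String × String)) : Option String :=
  let header_names := ["x-correlation-id", "x-request-id", "x-trace-id"]
  let normalized := headers.foldl (fun d p => d.insert (PySem.Str.lower p.1) p.2) PySem.Dict.empty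
  pvALoop normalized header_names

-- ===== PORT B =====
def extract_correlation_id_from_headers_alt (headers : List (String × String)) : Option String :=
  let priority : PySem.Dict String Int :=
    PySem.Dict.ofList [("x-correlation-id", 0), ("x-request-id", 1), ("x-trace-id", 2)]
  let best := headers.foldl (fun best p =>
    match priority.get? (PySem.Str.lower p.1) with
    | none => best
    | some rank =>
      match best with
      | none => some (rank, p.2)
      | some b => if rank < b.1 then some (rank, p.2) else best) none
  match best with
  | none => none
  | some b => some b.2

-- ===== PRECONDITION & SPEC =====
-- Pre_ excludes headers in which some target header name occurs more than once after
-- lowercasing: there A's value comes from accidental dict-reinsertion order (last duplicate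
-- wins) while B keeps the first match, and neither choice is specified.
def Pre_extract_correlation_id_from_headers (headers : List (String × String)) : Prop :=
  ∀ n ∈ ["x-correlation-id", "x-request-id", "x-trace-id"],
    headers.countP (fun p => decide (PySem.Str.lower p.1 = n)) ≤ 1
instance (headers : List (String × String)) : Decidable (Pre_extract_correlation_id_from_headers headers) := by unfold Pre_extract_correlation_id_from_headers; infer_instance

def pvWitness_extract_correlation_id_from_headers : (List (String × String)) :=
  [("X-Correlation-ID", "abc-123"), ("Accept", "text/html")]

def Spec_extract_correlation_id_from_headers (headers : List (String × String)) (out : Option String) : Prop := out = extract_correlation_id_from_headers_alt headers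
instance (headers : List (String × String)) (out : Option String) : Decidable (Spec_extract_correlation_id_from_headers headers out) := by unfold Spec_extract_correlation_id_from_headers; infer_instance

-- ===== CLAIM (what is proved, stated in full; the proofs are below) =====
def Claim_equal_extract_correlation_id_from_headers : Prop := ∀ (headers : List (String × String)), Dom_extract_correlation_id_from_headers headers → Pre_extract_correlation_id_from_headers headers → Spec_extract_correlation_id_from_headers headers (extract_correlation_id_from_headers headers)

-- ===== LEMMAS AND PROOFS =====

-- B's state update, factored out of its fold
def pvUpd (acc : Option (Int × String)) (r : Int) (w : Option String) : Option (Int × String) :=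
  match w with
  | none => acc
  | some v =>
    match acc with
    | none => some (r, v)
    | some b => if r < b.1 then some (r, v) else acc

theorem pvUpd_none (r : Int) (v : String) : pvUpd none r (some v) = some (r, v) := rfl
theorem pvUpd_some (b : Int × String) (r : Int) (v : String) :
    pvUpd (some b) r (some v) = if r < b.1 then some (r, v) else some b := rfl

theorem pvUpd_skip (acc : Option (Int × String)) (r r' : Int) (v : String) (w : Option String)
    (h : r ≤ r') : pvUpd (pvUpd acc r (some v)) r' w = pvUpd acc r (some v) := by
  cases w with
  | none => rfl
  | some w' =>
    cases acc with
    | none => rw [pvUpd_none, pvUpd_some, if_neg (by first | omega | (simp; omega))]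
    | some b =>
      rw [pvUpd_some]
      by_cases hb : r < b.1
      · rw [if_pos hb, pvUpd_some, if_neg (by first | omega | (simp; omega))]
      · rw [if_neg hb, pvUpd_some, if_neg (by omega)]

theorem pvUpd_comm (acc : Option (Int × String)) (r0 r1 : Int) (v1 : String) (w0 : Option String)
    (h : r0 < r1) :
    pvUpd (pvUpd acc r1 (some v1)) r0 w0 = pvUpd (pvUpd acc r0 w0) r1 (some v1) := by
  cases w0 with
  | none => rfl
  | some w =>
    cases acc with
    | none =>
      rw [pvUpd_none, pvUpd_none, pvUpd_some, pvUpd_some,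
        if_pos (show r0 < (r1, v1).1 by simpa using h), if_neg (by first | omega | (simp; omega))]
    | some b =>
      by_cases h1b : r1 < b.1
      · rw [pvUpd_some, if_pos h1b, pvUpd_some, pvUpd_some, if_pos (by first | omega | (simp; omega)),
          if_pos (by first | omega | (simp; omega)), pvUpd_some, if_neg (by first | omega | (simp; omega))]
      · rw [pvUpd_some, if_neg h1b, pvUpd_some]
        by_cases h0b : r0 < b.1
        · rw [if_pos h0b, pvUpd_some, if_neg (show ¬ r1 < (r0, w).1 by first | omega | (simp; omega))]
        · rw [if_neg h0b, pvUpd_some, if_neg h1b]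

-- first match of a lowered key (what B keeps within one rank)
def pvFirst (n : String) (hs : List (String × String)) : Option String :=
  (hs.find? (fun p => decide (PySem.Str.lower p.1 = n))).map (·.2)

theorem pvFirst_cons (n : String) (p : String × String) (t : List (String × String)) :
    pvFirst n (p :: t) = if PySem.Str.lower p.1 = n then some p.2 else pvFirst n t := by
  unfold pvFirst
  rw [List.find?_cons]
  split_ifs with h <;> simp [h]

-- the literal priority dict looks up as three nested ifs
theorem pvPriority_get? (s : String) :
    (PySem.Dict.ofList [("x-correlation-id", (0:Int)), ("x-request-id", 1), ("x-trace-id", 2)]).get? s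
      = if s = "x-correlation-id" then some 0
        else if s = "x-request-id" then some 1
        else if s = "x-trace-id" then some 2 else none := by
  show (PySem.Dict.mk [("x-correlation-id", (0:Int)), ("x-request-id", 1), ("x-trace-id", 2)]).get? s = _
  by_cases h0 : s = "x-correlation-id"
  · subst h0; decide
  · by_cases h1 : s = "x-request-id"
    · subst h1; decide
    · by_cases h2 : s = "x-trace-id"
      · subst h2; decide
      · rw [if_neg h0, if_neg h1, if_neg h2]
        simp only [PySem.Dict.get?_mk_cons, beq_iff_eq]
        rw [if_neg (fun h => h0 h.symm), if_neg (fun h => h1 h.symm), if_neg (fun h => h2 h.symm)]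
        rfl

-- B's fold = apply the three first-matches in rank order
theorem pvFoldB (hs : List (String × String)) : ∀ acc : Option (Int × String),
    hs.foldl (fun best p =>
      match (PySem.Dict.ofList [("x-correlation-id", (0:Int)), ("x-request-id", 1), ("x-trace-id", 2)]).get? (PySem.Str.lower p.1) with
      | none => best
      | some rank =>
        match best with
        | none => some (rank, p.2)
        | some b => if rank < b.1 then some (rank, p.2) else best) acc
    = pvUpd (pvUpd (pvUpd acc 0 (pvFirst "x-correlation-id" hs)) 1 (pvFirst "x-request-id" hs)) 2 (pvFirst "x-trace-id" hs) := by
  induction hs with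
  | nil => intro acc; simp [pvFirst, pvUpd]
  | cons p t ih =>
    intro acc
    rw [List.foldl_cons, ih, pvFirst_cons, pvFirst_cons, pvFirst_cons, pvPriority_get?]
    by_cases h0 : PySem.Str.lower p.1 = "x-correlation-id"
    · rw [if_pos h0, if_pos h0,
        if_neg (show ¬ PySem.Str.lower p.1 = "x-request-id" by rw [h0]; decide),
        if_neg (show ¬ PySem.Str.lower p.1 = "x-trace-id" by rw [h0]; decide)]
      show pvUpd (pvUpd (pvUpd (pvUpd acc 0 (some p.2)) 0 (pvFirst "x-correlation-id" t)) 1 _) 2 _ = _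
      rw [pvUpd_skip _ 0 0 _ _ (le_refl 0)]
    · rw [if_neg h0, if_neg h0]
      by_cases h1 : PySem.Str.lower p.1 = "x-request-id"
      · rw [if_pos h1, if_pos h1,
          if_neg (show ¬ PySem.Str.lower p.1 = "x-trace-id" by rw [h1]; decide)]
        show pvUpd (pvUpd (pvUpd (pvUpd acc 1 (some p.2)) 0 (pvFirst "x-correlation-id" t)) 1 _) 2 _ = _
        rw [pvUpd_comm _ 0 1 _ _ (by norm_num), pvUpd_skip _ 1 1 _ _ (le_refl 1)]
      · rw [if_neg h1, if_neg h1]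
        by_cases h2 : PySem.Str.lower p.1 = "x-trace-id"
        · rw [if_pos h2, if_pos h2]
          show pvUpd (pvUpd (pvUpd (pvUpd acc 2 (some p.2)) 0 (pvFirst "x-correlation-id" t)) 1 _) 2 _ = _
          rw [pvUpd_comm _ 0 2 _ _ (by norm_num), pvUpd_comm _ 1 2 _ _ (by norm_num),
            pvUpd_skip _ 2 2 _ _ (le_refl 2)]
        · rw [if_neg h2, if_neg h2]

-- B's result is the orElse chain of the three first matches
theorem pvB_eq_firstChain (hs : List (String × String)) :
    extract_correlation_id_from_headers_alt hs
      = ((pvFirst "x-correlation-id" hs).orElse (fun _ =>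
          (pvFirst "x-request-id" hs).orElse (fun _ => pvFirst "x-trace-id" hs))) := by
  show (match hs.foldl (fun best p =>
      match (PySem.Dict.ofList [("x-correlation-id", (0:Int)), ("x-request-id", 1), ("x-trace-id", 2)]).get? (PySem.Str.lower p.1) with
      | none => best
      | some rank =>
        match best with
        | none => some (rank, p.2)
        | some b => if rank < b.1 then some (rank, p.2) else best) none with
    | none => none
    | some b => some b.2) = _
  rw [pvFoldB]
  rcases pvFirst "x-correlation-id" hs with _ | v0 <;>
    rcases pvFirst "x-request-id" hs with _ | v1 <;>
      rcases pvFirst "x-trace-id" hs with _ | v2 <;> simp [pvUpd, Option.orElse]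

-- last match of a lowered key (what A's rebuilt dict stores)
def pvLast (n : String) (hs : List (String × String)) : Option String :=
  hs.foldl (fun acc p => if PySem.Str.lower p.1 = n then some p.2 else acc) none

-- the normalized dict's lookup is exactly the last-match fold
theorem get?_fold_insert (name : String) (headers : List (String × String))
    (d : PySem.Dict String String) :
    (headers.foldl (fun d p => d.insert (PySem.Str.lower p.1) p.2) d).get? name
      = headers.foldl (fun acc p => if PySem.Str.lower p.1 = name then some p.2 else acc)
          (d.get? name) := by
  induction headers generalizing d with
  | nil => rfl
  | cons p rest ih =>
      simp only [List.foldl_cons, ih, PySem.Dict.get?_insert]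
      by_cases h : PySem.Str.lower p.1 = name
      · simp [h]
      · rw [if_neg (fun hh => h hh.symm), if_neg h]

theorem get?_normalized (name : String) (headers : List (String × String)) :
    (headers.foldl (fun d p => d.insert (PySem.Str.lower p.1) p.2) PySem.Dict.empty).get? name
      = pvLast name headers := by
  rw [get?_fold_insert]; rfl

-- a fold over match-free pairs keeps its accumulator
theorem pvLast_no_match (n : String) (t : List (String × String))
    (h : ∀ p ∈ t, ¬ PySem.Str.lower p.1 = n) (acc : Option String) :
    t.foldl (fun acc p => if PySem.Str.lower p.1 = n then some p.2 else acc) acc = acc := by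
  induction t generalizing acc with
  | nil => rfl
  | cons p t ih =>
    rw [List.foldl_cons, if_neg (h p (List.mem_cons_self ..))]
    exact ih (fun q hq => h q (List.mem_cons_of_mem _ hq)) acc

-- with at most one match, last match = first match
theorem pvLast_eq_pvFirst (n : String) (hs : List (String × String))
    (h : hs.countP (fun p => decide (PySem.Str.lower p.1 = n)) ≤ 1) :
    pvLast n hs = pvFirst n hs := by
  induction hs with
  | nil => rfl
  | cons p t ih =>
    rw [pvFirst_cons]
    by_cases hp : PySem.Str.lower p.1 = n
    · have hnone : ∀ q ∈ t, ¬ PySem.Str.lower q.1 = n := by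
        rw [List.countP_cons] at h; simp [hp] at h
        exact fun q hq => h q.1 q.2 hq
      unfold pvLast
      rw [List.foldl_cons, if_pos hp, pvLast_no_match n t hnone, if_pos hp]
    · have hc : t.countP (fun p => decide (PySem.Str.lower p.1 = n)) ≤ 1 := by
        rw [List.countP_cons] at h; simp [hp] at h; omega
      unfold pvLast
      rw [List.foldl_cons, if_neg hp, if_neg hp]
      exact ih hc

-- ===== VERDICT (by name: the statement is the Claim_ definition above) =====
theorem extract_correlation_id_from_headers_spec : Claim_equal_extract_correlation_id_from_headers := by
  intro headers _ hpre
  unfold Spec_extract_correlation_id_from_headers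
  have h0 := pvLast_eq_pvFirst "x-correlation-id" headers (hpre _ (by simp))
  have h1 := pvLast_eq_pvFirst "x-request-id" headers (hpre _ (by simp))
  have h2 := pvLast_eq_pvFirst "x-trace-id" headers (hpre _ (by simp))
  rw [pvB_eq_firstChain, ← h0, ← h1, ← h2]
  unfold extract_correlation_id_from_headers
  simp only [pvALoop, PySem.Dict.contains_eq_isSome_get?, get?_normalized]
  rcases pvLast "x-correlation-id" headers with _ | v0 <;>
    rcases pvLast "x-request-id" headers with _ | v1 <;>
      rcases pvLast "x-trace-id" headers with _ | v2 <;> simp [Option.orElse]
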